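-- pv_equiv track=rewrite | github.com/yeseul106/BaekJoon_algorithm | 프로그래머스/2/17687. ［3차］ n진수 게임/［3차］ n진수 게임.py | solution
-- ===== SOURCE A (Python) =====
-- def convert(number, n):
--     if number == 0:
--         return '0'
--     NUMBERS = "0123456789ABCDEF"
--     res = ""
--     while number > 0 :
--         number , mod = divmod(number, n)
--         res += NUMBERS[mod]
--     return res[::-1] # 문자열 뒤집기
--
-- def solution(n, t, m, p):
--     arr = ''
--     answer = ''
--
--     # n진법으로 바꾸면서 미리 배열을 구해놓는데, 그 길이가 t*m 보다 클 때까지만 구해놓기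
--     num = 0;
--     while len(arr) <= (t*m):
--         arr += convert(num, n)
--         num += 1
--
--     cnt = 0
--     idx = p-1
--
--     for i in range(t):
--         answer += arr[idx]
--         idx += m
--
--     return answer
-- ===== SOURCE B (Python) =====
-- DIGITS = "0123456789ABCDEF"
--
-- def _digits(num, n):
--     # base-n representation of num, most significant digit first (_digits(0, n) == "0")
--     if num < n:
--         return DIGITS[num]
--     return _digits(num // n, n) + DIGITS[num % n]
--
-- def solution(n, t, m, p):
--     # Single streaming pass: never materialise the concatenated digit string.
--     answer = []
--     pos = 0          # how many digits of the stream have been seen so far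
--     want = p - 1     # absolute index of the next digit to collect
--     num = 0
--     while len(answer) < t:
--         for c in _digits(num, n):
--             if pos == want:
--                 answer.append(c)
--                 want += m
--                 if len(answer) == t:
--                     break
--             pos += 1
--         num += 1
--     return ''.join(answer)
-- ===== Notes on version B (the rewrite author's own statement) =====
-- stated objective: alternative
-- what changed: Replaces A's two-phase build-the-whole-string-then-sample-every-m-th-char with a single streaming pass that keeps only a position counter, the next wanted absolute index and the partial answer (never storing the concatenated string), and computes each number's base-n digits by recursion (MSB-first) instead of A's LSB loop plus reversal.
-- outside the precondition, e.g. on solution(2, 1, 1, 0): A returns '1', B does not finish within the time limit; on solution(-3, 1, 1, 1): A returns '0', B raises RecursionError; on solution(2, 1, 2, 4): A returns '0', B returns '0'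
import Mathlib
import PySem

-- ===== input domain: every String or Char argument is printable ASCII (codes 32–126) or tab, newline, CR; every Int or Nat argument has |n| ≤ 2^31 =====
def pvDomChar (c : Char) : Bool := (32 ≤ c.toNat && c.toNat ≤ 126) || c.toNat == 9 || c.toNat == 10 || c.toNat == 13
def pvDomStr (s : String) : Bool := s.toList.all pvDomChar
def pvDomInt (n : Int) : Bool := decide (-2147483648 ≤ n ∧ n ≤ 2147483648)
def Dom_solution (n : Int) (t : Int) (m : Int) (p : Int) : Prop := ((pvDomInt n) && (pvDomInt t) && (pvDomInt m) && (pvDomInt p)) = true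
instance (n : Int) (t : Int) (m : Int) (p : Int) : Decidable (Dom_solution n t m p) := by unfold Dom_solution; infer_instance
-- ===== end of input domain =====

-- B replaces A's "build the whole concatenated base-n string, then sample every m-th char" with a
-- single streaming pass keeping only a position counter and the partial answer (alternative
-- decomposition, not claimed faster); equivalence is about the return value only.

-- ===== PORT A =====
def pvNUMBERS : List Char := "0123456789ABCDEF".toList

-- while number > 0: number, mod = divmod(number, n); res += NUMBERS[mod]   (fuel = number+1 suffices on Pre_)
def convLoopA : Nat → Int → Int → List Char → List Char
  | 0, _, _, res => res
  | fuel+1, number, n, res =>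
    if 0 < number then
      convLoopA fuel (PySem.Int.floordiv number n) n
        (res ++ [(PySem.List.pyGet? pvNUMBERS (PySem.Int.mod number n)).getD ' '])
    else res

-- convert(number, n); the final res[::-1] is the .reverse
def convertA (number n : Int) : List Char :=
  if number = 0 then ['0'] else (convLoopA (number.toNat + 1) number n []).reverse

-- while len(arr) <= t*m: arr += convert(num, n); num += 1   (each block is nonempty, so t*m+2 iterations suffice)
def buildLoopA : Nat → Int → Int → Int → List Char → List Char
  | 0, _, _, _, arr => arr
  | fuel+1, n, tm, num, arr =>
    if (arr.length : Int) ≤ tm then buildLoopA fuel n tm (num + 1) (arr ++ convertA num n)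
    else arr

-- for i in range(t): answer += arr[idx]; idx += m
def sampleLoopA : Nat → List Char → Int → Int → List Char → List Char
  | 0, _, _, _, ans => ans
  | k+1, arr, idx, m, ans =>
    sampleLoopA k arr (idx + m) m (ans ++ [(PySem.List.pyGet? arr idx).getD ' '])

def solution (n : Int) (t : Int) (m : Int) (p : Int) : String :=
  let arr := buildLoopA ((t * m).toNat + 2) n (t * m) 0 []
  String.mk (sampleLoopA t.toNat arr (p - 1) m [])

-- ===== PORT B =====
-- _digits(num, n): most-significant-first digits by recursion (fuel = num+1 suffices on Pre_)
def digitsBF : Nat → Int → Int → List Char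
  | 0, _, _ => []
  | f+1, num, n =>
    if num < n then [(PySem.List.pyGet? pvNUMBERS num).getD ' ']
    else digitsBF f (PySem.Int.floordiv num n) n
      ++ [(PySem.List.pyGet? pvNUMBERS (PySem.Int.mod num n)).getD ' ']

def digitsB (num n : Int) : List Char := digitsBF (num.toNat + 1) num n

-- the inner 'for c in _digits(num, n)' with the cursor pos, next wanted index want, and break once full
def scanDigitsB (t : Nat) (m : Int) : List Char → Int → Int → List Char → Int × Int × List Char
  | [], pos, want, ans => (pos, want, ans)
  | c :: cs, pos, want, ans =>
    if pos = want then
      let ans' := ans ++ [c]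
      if ans'.length = t then (pos, want + m, ans')
      else scanDigitsB t m cs (pos + 1) (want + m) ans'
    else scanDigitsB t m cs (pos + 1) want ans

-- while len(answer) < t: scan the digits of num; num += 1   (t*m+2 numbers suffice on Pre_)
def streamLoopB : Nat → Int → Nat → Int → Int → Int → Int → List Char → List Char
  | 0, _, _, _, _, _, _, ans => ans
  | fuel+1, n, t, m, num, pos, want, ans =>
    if ans.length < t then
      match scanDigitsB t m (digitsB num n) pos want ans with
      | (pos', want', ans') => streamLoopB fuel n t m (num + 1) pos' want' ans'
    else ans

def solution_alt (n : Int) (t : Int) (m : Int) (p : Int) : String :=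
  String.mk (streamLoopB ((p + t * m).toNat + p.toNat + 2) n t.toNat m 0 0 (p - 1) [])

-- ===== PRECONDITION & SPEC =====
-- Pre_ is every input on which A returns normally except wraparound corners: the problem domain
-- 2 ≤ n, 1 ≤ p ≤ m+1 (every such index lands inside the built string; n > 16 only while the build
-- stays below the first two-digit number, t*m ≤ 15),
-- plus the trivial region t ≤ 0 where both programs return ''. Outside Pre_ A raises (n ≤ 1 divides
-- by zero or loops forever, NUMBERS indexed out of range, arr[idx] an IndexError) or A's value rests
-- on negative-index wraparound (p ≤ 0, n < 0) / accidental slack of the built string (p > m), where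
-- B diverges, raises or may differ.
def Pre_solution (n : Int) (t : Int) (m : Int) (p : Int) : Prop :=
  (2 ≤ n ∧ (n ≤ 16 ∨ t * m ≤ 15) ∧ 1 ≤ m ∧ 1 ≤ p ∧ p ≤ m + 1) ∨
  (t ≤ 0 ∧ (t * m ≤ 0 ∨ (2 ≤ n ∧ (n ≤ 16 ∨ t * m ≤ 15))))

instance (n : Int) (t : Int) (m : Int) (p : Int) : Decidable (Pre_solution n t m p) := by
  unfold Pre_solution; infer_instance

def pvWitness_solution : Int × Int × Int × Int := (2, 4, 2, 1)

def Spec_solution (n : Int) (t : Int) (m : Int) (p : Int) (out : String) : Prop := out = solution_alt n t m p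
instance (n : Int) (t : Int) (m : Int) (p : Int) (out : String) : Decidable (Spec_solution n t m p out) := by unfold Spec_solution; infer_instance

-- ===== CLAIM (what is proved, stated in full; the proofs are below) =====
def Claim_equal_solution : Prop := ∀ (n : Int) (t : Int) (m : Int) (p : Int), Dom_solution n t m p → Pre_solution n t m p → Spec_solution n t m p (solution n t m p)

-- ===== LEMMAS AND PROOFS =====

-- the k-th block of the digit stream, and the stream's first N blocks, per A's convert
def blkA (n : Int) (k : Nat) : List Char := convertA (k : Int) n
def LA (n : Int) (N : Nat) : List Char := (List.range N).flatMap (blkA n)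

-- the reference answer: the chars of G at positions q, q+m, …, q+(k-1)m
def pickR (G : List Char) (q m : Int) (k : Nat) : List Char :=
  (List.range k).map (fun i : Nat => G.getD (q + (i : Int) * m).toNat ' ')

lemma LA_succ (n : Int) (N : Nat) : LA n (N + 1) = LA n N ++ blkA n N := by
  simp [LA, List.range_succ]

lemma convLoop_len (n : Int) : ∀ f : Nat, ∀ num : Int, ∀ res : List Char,
    res.length ≤ (convLoopA f num n res).length := by
  intro f
  induction f with
  | zero => intro num res; simp [convLoopA]
  | succ f ih =>
    intro num res
    simp only [convLoopA]
    split
    · exact le_trans (by simp) (ih _ _)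
    · exact le_refl _

lemma length_blk_pos (n : Int) (k : Nat) : 0 < (blkA n k).length := by
  unfold blkA convertA
  split
  · simp
  · rename_i h
    have hk : 0 < (k : Int) := by omega
    have : ((k : Int).toNat + 1) = k + 1 := by omega
    rw [this]
    simp only [convLoopA, hk, if_true, List.length_reverse]
    calc 0 < 1 := one_pos
      _ ≤ _ := by
        have := convLoop_len n k (PySem.Int.floordiv (k : Int) n)
          ([] ++ [(PySem.List.pyGet? pvNUMBERS (PySem.Int.mod (k : Int) n)).getD ' '])
        simpa using this

lemma length_LA_ge (n : Int) (N : Nat) : N ≤ (LA n N).length := by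
  induction N with
  | zero => simp [LA]
  | succ N ih =>
    rw [LA_succ]
    have := length_blk_pos n N
    simp only [List.length_append]
    omega

lemma LA_prefix (n : Int) {N M : Nat} (h : N ≤ M) : LA n N <+: LA n M := by
  induction M with
  | zero => simp_all
  | succ M ih =>
    rcases Nat.le_succ_iff.mp h with h' | h'
    · exact (ih h').trans (by rw [LA_succ]; exact List.prefix_append _ _)
    · simp [h']

lemma pickR_snoc (G : List Char) (q m : Int) (k : Nat) :
    pickR G q m (k + 1) = pickR G q m k ++ [G.getD (q + (k : Int) * m).toNat ' '] := by
  simp [pickR, List.range_succ]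

lemma pickR_cons (G : List Char) (q m : Int) (k : Nat) :
    pickR G q m (k + 1) = G.getD q.toNat ' ' :: pickR G (q + m) m k := by
  unfold pickR
  rw [List.range_succ_eq_map]
  simp only [List.map_cons, List.map_map, Nat.cast_zero, zero_mul, add_zero]
  congr 1
  apply List.map_congr_left
  intro i _
  simp only [Function.comp_apply]
  congr 2
  push_cast
  ring

lemma pick_prefix (G1 G2 : List Char) (q m : Int) (k : Nat) (hpre : G1 <+: G2)
    (hb : ∀ i : Nat, i < k → (q + (i : Int) * m).toNat < G1.length) :
    pickR G1 q m k = pickR G2 q m k := by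
  unfold pickR
  apply List.map_congr_left
  intro i hi
  simp only [List.mem_range] at hi
  have h1 := hb i hi
  have h2 : (q + (i : Int) * m).toNat < G2.length := lt_of_lt_of_le h1 hpre.length_le
  rw [List.getD_eq_getElem _ _ h1, List.getD_eq_getElem _ _ h2]
  exact hpre.getElem h1

-- A's convert, reversed at the end, computes B's recursive MSB-first digits
lemma conv_rev_eq_digits (ν : Nat) (hν : 2 ≤ ν) :
    ∀ k : Nat, 1 ≤ k → ∀ f1 f2 : Nat, ∀ res : List Char, k < f1 → k < f2 →
      (convLoopA f1 (k : Int) (ν : Int) res).reverse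
        = digitsBF f2 (k : Int) (ν : Int) ++ res.reverse := by
  intro k
  induction k using Nat.strong_induction_on with
  | _ k ih =>
    intro hk f1 f2 res hf1 hf2
    obtain ⟨a, rfl⟩ : ∃ a, f1 = a + 1 := ⟨f1 - 1, by omega⟩
    obtain ⟨b, rfl⟩ : ∃ b, f2 = b + 1 := ⟨f2 - 1, by omega⟩
    have hkpos : (0 : Int) < (k : Int) := by exact_mod_cast hk
    simp only [convLoopA, digitsBF, hkpos, if_true,
      PySem.Int.floordiv_natCast, PySem.Int.mod_natCast, PySem.List.pyGet?_natCast]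
    by_cases hlt : k < ν
    · have hdiv : k / ν = 0 := Nat.div_eq_of_lt hlt
      have hmod : k % ν = k := Nat.mod_eq_of_lt hlt
      have hlt' : (k : Int) < (ν : Int) := by exact_mod_cast hlt
      rw [hdiv, hmod]
      have z : ∀ f r, convLoopA f ((0 : Nat) : Int) (ν : Int) r = r := by
        intro f r; cases f <;> simp [convLoopA]
      rw [z, if_pos hlt']
      simp
    · have hge : ¬ ((k : Int) < (ν : Int)) := by exact_mod_cast hlt
      rw [if_neg hge]
      have hdlt : k / ν < k := Nat.div_lt_self (by omega) (by omega)
      have hd1 : 1 ≤ k / ν := (Nat.one_le_div_iff (by omega)).mpr (by omega)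
      rw [ih (k / ν) hdlt hd1 a b _ (by omega) (by omega)]
      simp

lemma blk_eq_digits (ν : Nat) (hν : 2 ≤ ν) (k : Nat) :
    digitsB (k : Int) (ν : Int) = blkA (ν : Int) k := by
  unfold digitsB blkA convertA
  rcases Nat.eq_zero_or_pos k with rfl | hk
  · have h0 : ((0 : Nat) : Int) < (ν : Int) := by exact_mod_cast (by omega : 0 < ν)
    norm_num [digitsBF, h0]
    rw [if_pos (show 0 < ν by omega)]
    decide
  · have hk0 : ¬ ((k : Int) = 0) := by omega
    rw [if_neg hk0]
    have ht : ((k : Int).toNat + 1) = k + 1 := by omega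
    rw [ht, conv_rev_eq_digits ν hν k hk (k+1) (k+1) [] (by omega) (by omega)]
    simp

-- A's build loop produces exactly the first N blocks for some N with length > t*m
lemma build_spec (n tm : Int) :
    ∀ fuel : Nat, ∀ j : Nat, tm + 2 ≤ (j : Int) + (fuel : Int) →
      ∃ N : Nat, j ≤ N ∧ N ≤ j + fuel ∧
        buildLoopA fuel n tm (j : Int) (LA n j) = LA n N ∧ tm < ((LA n N).length : Int) := by
  intro fuel
  induction fuel with
  | zero =>
    intro j hj
    refine ⟨j, le_refl _, by omega, rfl, ?_⟩
    have := length_LA_ge n j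
    simp only [Nat.cast_zero, add_zero] at hj
    omega
  | succ fuel ih =>
    intro j hj
    by_cases h : ((LA n j).length : Int) ≤ tm
    · have hrec := ih (j + 1) (by push_cast; push_cast at hj; omega)
      have harg : (j : Int) + 1 = ((j + 1 : Nat) : Int) := by push_cast; ring
      rcases hrec with ⟨N, hN1, hN2, hN3, hN4⟩
      refine ⟨N, by omega, by omega, ?_, hN4⟩
      simp only [buildLoopA, h, if_true]
      rw [harg, show LA n j ++ convertA (j : Int) n = LA n (j + 1) from (LA_succ n j).symm]
      exact hN3
    · exact ⟨j, le_refl _, by omega, by simp [buildLoopA, h], by omega⟩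

-- A's sampling loop returns the picked chars
lemma sample_spec (arr : List Char) (m : Int) (hm : 0 ≤ m) :
    ∀ k : Nat, ∀ idx : Int, ∀ ans : List Char, 0 ≤ idx →
      (∀ i : Nat, i < k → (idx + (i : Int) * m).toNat < arr.length) →
      sampleLoopA k arr idx m ans = ans ++ pickR arr idx m k := by
  intro k
  induction k with
  | zero => intro idx ans _ _; simp [sampleLoopA, pickR]
  | succ k ih =>
    intro idx ans hidx hb
    have h0 : idx.toNat < arr.length := by
      have := hb 0 (by omega); simpa using this
    have hget : (PySem.List.pyGet? arr idx).getD ' ' = arr.getD idx.toNat ' ' := by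
      rw [PySem.List.pyGet?_of_nonneg _ hidx]
      simp [List.getD]
    simp only [sampleLoopA]
    rw [ih (idx + m) _ (by omega) (by
      intro i hi
      have := hb (i + 1) (by omega)
      have harg : idx + m + (i : Int) * m = idx + ((i : Int) + 1) * m := by ring
      rw [harg]
      push_cast at this ⊢
      exact this)]

    rw [hget, pickR_cons]
    simp

-- B's inner scan over one chunk of the stream
lemma scan_spec (G : List Char) (t : Nat) (m q : Int) (hm : 1 ≤ m) :
    ∀ cs : List Char, ∀ pos want : Int, ∀ ans : List Char,
      0 ≤ pos →
      ans.length < t →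
      want = q + (ans.length : Int) * m →
      pos ≤ want →
      ans = pickR G q m ans.length →
      (∀ j : Nat, j < cs.length → cs.getD j ' ' = G.getD (pos + (j : Int)).toNat ' ') →
      (scanDigitsB t m cs pos want ans).2.2 = pickR G q m (scanDigitsB t m cs pos want ans).2.2.length ∧
      ans.length ≤ (scanDigitsB t m cs pos want ans).2.2.length ∧
      (scanDigitsB t m cs pos want ans).2.2.length ≤ t ∧
      ((scanDigitsB t m cs pos want ans).2.2.length < t →
        (scanDigitsB t m cs pos want ans).1 = pos + (cs.length : Int) ∧
        (scanDigitsB t m cs pos want ans).1 ≤ q + ((scanDigitsB t m cs pos want ans).2.2.length : Int) * m ∧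
        (scanDigitsB t m cs pos want ans).2.1 = q + ((scanDigitsB t m cs pos want ans).2.2.length : Int) * m) := by
  intro cs
  induction cs with
  | nil =>
    intro pos want ans h0 h1 h2 h3 h4 h5
    simp only [scanDigitsB]
    exact ⟨h4, le_refl _, le_of_lt h1, fun _ => ⟨by simp, h2 ▸ h3, h2⟩⟩
  | cons c cs ih =>
    intro pos want ans h0 h1 h2 h3 h4 h5
    by_cases hpw : pos = want
    · have hc : c = G.getD want.toNat ' ' := by
        have := h5 0 (by simp)
        simpa [hpw] using this
      have hans' : ans ++ [c] = pickR G q m (ans.length + 1) := by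
        rw [pickR_snoc, ← h4, hc, h2]
      have h5' : ∀ j : Nat, j < cs.length → cs.getD j ' ' = G.getD ((pos + 1) + (j : Int)).toNat ' ' := by
        intro j hj
        have h := h5 (j + 1) (by simp only [List.length_cons]; omega)
        have e : pos + (((j : Nat) + 1 : Nat) : Int) = pos + 1 + (j : Int) := by push_cast; ring
        rw [e] at h
        simpa using h
      by_cases hfull : (ans ++ [c]).length = t
      · simp only [scanDigitsB, if_pos hpw, if_pos hfull]
        refine ⟨by simpa using hans', by simp, by simp at hfull ⊢; omega, fun h => absurd hfull (by omega)⟩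
      · have hrec := ih (pos + 1) (want + m) (ans ++ [c]) (by omega)
          (by simp at hfull ⊢; omega)
          (by simp only [List.length_append, List.length_cons, List.length_nil]; rw [h2]; push_cast; ring)
          (by omega)
          (by simpa using hans') h5'
        simp only [scanDigitsB, if_pos hpw, if_neg hfull]
        obtain ⟨A1, A2, A3, A4⟩ := hrec
        refine ⟨A1, by simp at A2; omega, A3, fun h => ?_⟩
        obtain ⟨B1, B2, B3⟩ := A4 h
        exact ⟨by rw [B1]; simp only [List.length_cons]; push_cast; ring, B2, B3⟩
    · have h5' : ∀ j : Nat, j < cs.length → cs.getD j ' ' = G.getD ((pos + 1) + (j : Int)).toNat ' ' := by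
        intro j hj
        have h := h5 (j + 1) (by simp only [List.length_cons]; omega)
        have e : pos + (((j : Nat) + 1 : Nat) : Int) = pos + 1 + (j : Int) := by push_cast; ring
        rw [e] at h
        simpa using h
      have hrec := ih (pos + 1) want ans (by omega) h1 h2 (by omega) h4 h5'
      simp only [scanDigitsB, if_neg hpw]
      obtain ⟨A1, A2, A3, A4⟩ := hrec
      refine ⟨A1, A2, A3, fun h => ?_⟩
      obtain ⟨B1, B2, B3⟩ := A4 h
      exact ⟨by rw [B1]; simp only [List.length_cons]; push_cast; ring, B2, B3⟩

-- one chunk of the stream, read in place inside LA n NB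
lemma chunk_getD (n : Int) (j NB : Nat) (hj : j < NB) :
    ∀ j' : Nat, j' < (blkA n j).length →
      (blkA n j).getD j' ' ' = (LA n NB).getD ((((LA n j).length : Int) + (j' : Int)).toNat) ' ' := by
  intro j' hj'
  have hidx : ((((LA n j).length : Int) + (j' : Int)).toNat) = (LA n j).length + j' := by omega
  rw [hidx]
  have hpre : LA n (j + 1) <+: LA n NB := LA_prefix n (by omega)
  have hlen1 : (LA n j).length + j' < (LA n (j + 1)).length := by
    rw [LA_succ]; simp only [List.length_append]; omega
  have hlen2 : (LA n j).length + j' < (LA n NB).length := lt_of_lt_of_le hlen1 hpre.length_le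
  rw [List.getD_eq_getElem _ _ hj', List.getD_eq_getElem _ _ hlen2]
  have e1 : (LA n (j + 1))[(LA n j).length + j']'hlen1 = (blkA n j)[j']'hj' := by
    have hsplit : LA n (j + 1) = LA n j ++ blkA n j := LA_succ n j
    rw [List.getElem_of_eq hsplit, List.getElem_append_right (by omega)]
    congr 1
    omega
  rw [← e1]
  exact hpre.getElem hlen1

-- B's outer loop collects exactly the picked chars of the stream
lemma stream_spec (ν : Nat) (hν : 2 ≤ ν) (t : Nat) (m q : Int) (hm : 1 ≤ m) (hq : 0 ≤ q)
    (NB : Nat) (G : List Char) (hG : G = LA (ν : Int) NB)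
    (hwant : ∀ i : Nat, i < t → q + (i : Int) * m + 1 ≤ (NB : Int)) :
    ∀ fuel : Nat, ∀ j : Nat, ∀ pos want : Int, ∀ ans : List Char,
      j + fuel = NB →
      ans = pickR G q m ans.length →
      ans.length ≤ t →
      (ans.length < t → pos = ((LA (ν : Int) j).length : Int) ∧
        pos ≤ q + (ans.length : Int) * m ∧ want = q + (ans.length : Int) * m) →
      streamLoopB fuel (ν : Int) t m (j : Int) pos want ans = pickR G q m t := by
  intro fuel
  induction fuel with
  | zero =>
    intro j pos want ans hj h1 h2 h3
    have hlen : ans.length = t := by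
      by_contra hne
      have hlt : ans.length < t := lt_of_le_of_ne h2 hne
      obtain ⟨hpos, hple, -⟩ := h3 hlt
      have hb := hwant ans.length hlt
      have hge : (NB : Int) ≤ pos := by
        rw [hpos]
        have := length_LA_ge (ν : Int) j
        have hjNB : j = NB := by omega
        omega
      omega
    simp only [streamLoopB]
    rw [← hlen]
    exact h1
  | succ fuel ih =>
    intro j pos want ans hj h1 h2 h3
    by_cases hlt : ans.length < t
    · obtain ⟨hpos, hple, hwantv⟩ := h3 hlt
      have hchunk : digitsB (j : Int) (ν : Int) = blkA (ν : Int) j := blk_eq_digits ν hν j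
      have hg : ∀ j' : Nat, j' < (digitsB (j : Int) (ν : Int)).length →
          (digitsB (j : Int) (ν : Int)).getD j' ' ' = G.getD (pos + (j' : Int)).toNat ' ' := by
        rw [hchunk, hG, hpos]
        exact chunk_getD (ν : Int) j NB (by omega)
      have hs := scan_spec G t m q hm (digitsB (j : Int) (ν : Int)) pos want ans
        (by rw [hpos]; positivity) hlt hwantv (hwantv ▸ hple) h1 hg
      rcases hsc : scanDigitsB t m (digitsB (j : Int) (ν : Int)) pos want ans with ⟨pos', want', ans'⟩
      rw [hsc] at hs
      dsimp only at hs
      obtain ⟨A1, A2, A3, A4⟩ := hs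
      simp only [streamLoopB, if_pos hlt, hsc]
      have harg : (j : Int) + 1 = ((j + 1 : Nat) : Int) := by push_cast; ring
      rw [harg]
      apply ih (j + 1) pos' want' ans' (by omega) A1 A3
      intro hl
      obtain ⟨B1, B2, B3⟩ := A4 hl
      refine ⟨?_, B2, B3⟩
      rw [B1, hpos, hchunk, LA_succ]
      simp only [List.length_append]
      push_cast
      ring
    · have hlen : ans.length = t := le_antisymm h2 (not_lt.mp hlt)
      simp only [streamLoopB, if_neg hlt]
      rw [← hlen]
      exact h1

lemma LA_zero (n : Int) : LA n 0 = [] := by simp [LA]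

-- ===== VERDICT (by name: the statement is the Claim_ definition above) =====
theorem solution_spec : Claim_equal_solution := by
  intro n t m p _dom pre
  unfold Spec_solution
  rcases pre with ⟨hn2, -, hm, hp1, hpm⟩ | ⟨ht, -⟩
  · have hn : n = ((n.toNat : Nat) : Int) := by omega
    have hν : 2 ≤ n.toNat := by omega
    have hq : (0 : Int) ≤ p - 1 := by omega
    -- all wanted absolute indices are < t*m
    have hwant0 : ∀ i : Nat, i < t.toNat → (p - 1) + (i : Int) * m ≤ t * m := by
      intro i hi
      have hit : (i : Int) ≤ t - 1 := by omega
      have h1 : (i : Int) * m ≤ (t - 1) * m := mul_le_mul_of_nonneg_right hit (by omega)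
      nlinarith
    have hwant : ∀ i : Nat, i < t.toNat →
        (p - 1) + (i : Int) * m + 1 ≤ (((p + t * m).toNat + p.toNat + 2 : Nat) : Int) := by
      intro i hi
      have := hwant0 i hi
      push_cast
      omega
    -- A side: the built string is LA n N for some N with t*m < its length
    obtain ⟨N, hN0, hNle, hbuildeq, hlong⟩ :=
      build_spec n (t * m) ((t * m).toNat + 2) 0 (by push_cast; omega)
    rw [LA_zero, Nat.cast_zero] at hbuildeq
    have hidx : ∀ i : Nat, i < t.toNat → ((p - 1) + (i : Int) * m).toNat < (LA n N).length := by
      intro i hi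
      have := hwant0 i hi
      have ht1 : (1 : Int) ≤ t := by omega
      have htm1 : (1 : Int) ≤ t * m := by nlinarith
      omega
    have hA : solution n t m p = String.mk (pickR (LA n N) (p - 1) m t.toNat) := by
      simp only [solution]
      rw [hbuildeq, sample_spec (LA n N) m (by omega) t.toNat (p - 1) [] hq hidx]
      simp
    -- B side: the streaming loop collects the same picks out of the longer prefix
    have hB : solution_alt n t m p
        = String.mk (pickR (LA n ((p + t * m).toNat + p.toNat + 2)) (p - 1) m t.toNat) := by
      simp only [solution_alt]
      congr 1
      have hstream := stream_spec n.toNat hν t.toNat m (p - 1) hm hq ((p + t * m).toNat + p.toNat + 2)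
        (LA ((n.toNat : Nat) : Int) ((p + t * m).toNat + p.toNat + 2)) rfl hwant
        ((p + t * m).toNat + p.toNat + 2) 0 0 (p - 1) [] (by omega)
        (by simp [pickR]) (by simp)
        (fun _ => ⟨by rw [LA_zero]; simp, by simpa using hq, by simp⟩)
      rw [Nat.cast_zero] at hstream
      rw [← hn] at hstream
      exact hstream
    rw [hA, hB]
    congr 1
    exact pick_prefix (LA n N) (LA n ((p + t * m).toNat + p.toNat + 2)) (p - 1) m t.toNat
      (LA_prefix n (by omega)) hidx
  · -- t ≤ 0 and t*m ≤ 0: both programs return the empty string at once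
    have ht0 : t.toNat = 0 := by omega
    simp only [solution, solution_alt, ht0, sampleLoopA]
    rcases Nat.eq_zero_or_pos ((p + t * m).toNat + p.toNat) with h | h
    · rw [h]
      simp [streamLoopB]
    · obtain ⟨k, hk⟩ : ∃ k, (p + t * m).toNat + p.toNat = k + 1 := ⟨_, (Nat.succ_pred_eq_of_pos h).symm⟩
      rw [hk]
      show String.mk [] = String.mk (streamLoopB (k + 1 + 2) n 0 m 0 0 (p - 1) [])
      simp [streamLoopB]
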